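/- GENERATED by tools/from_farm_form.py from prooffarm-gif/accepted/DGifSlurp.10/Lemmas.lean (a worked proof of the farm's unit `DGifSlurp.10`,
   accepted by the verdict) — do not edit. -/
import Gif.Spec.Units.DGifSlurp_10
import Gif.Spec.AllSegs

/-!
  Lemmas for the unit `DGifSlurp.10` (segment 10 of `DGifSlurp`, 10A853H … 10A8A2H, dgif_lib.c:1277-1289): the segment is walked in
  THREE STEPS that meet at the return addresses of its two contract calls.

      sl10_env_at_call   `Env` at a callee's entry for the PRESENT heap `Hc` and forest `Fc` (`Env.at_call` asks for the entry's)
      sl10_at_move       `At` moves to another cut over instructions that store nothing (the four exits of the segment)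
      sl10_AtRet17       the assertion at 10A869H (`ret17`): `At` + what `DGifGetExtension` returned
                         (at 10A89CH, `ret19`, the design's `Rec` says all that is live: no private assertion is needed)
      sl10_seg_call      10A853H … the call of DGifGetExtension … 10A869H
      sl10_seg_err       10A869H … 10A8EDH                                            (GIF_ERROR)
      sl10_seg_null      10A869H … 10A8A2H                                            (GIF_OK, `ExtData = NULL`)
      sl10_seg_add       10A869H … the check, the call of GifAddExtensionBlock … 10A89CH  (GIF_OK, `ExtData = &pv.Buf`)
      sl10_seg_mid       the three arms behind `ret17`, chosen by `IsBool` and the success clause of DGifGetExtension's post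
      sl10_seg_tail      10A89CH … 10A8EDH | 10A8A2H
  The case split on the callee's result is made BEFORE each walk and handed to the walker in the form of its own branch facts
  (`(Word.part .w32 z).toNat = 0 / 1`, the loads as `l_*` facts): the dead arms are pruned, every walk is straight.
-/

open X86 X86.User Asan ProgX.Base ProgX.Base.Spec Gif.Spec

set_option maxRecDepth 4000
set_option maxHeartbeats 4000000

namespace Gif.Spec.DGifSlurp_10

/-- **`Env` at the entry of a callee of `DGifSlurp`, for the PRESENT heap and forest** (`Env.at_call` of FrameCarry.lean takes the
invariants for the ENTRY's heap and forest; here the heap `Hc` and the forest `Fc` are those of the cut). `henv` is the entry's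
environment (the static facts of `HeapPre`, the context, where the cursor is), `hreg` says `Hc` is at the place of the entry's heap,
`hinv` / `hok` are the cut's invariants at the memory `mem`, and the callee's entry state `s` differs from `mem` by stack stores
below `top` only. -/
theorem sl10_env_at_call {H Hc : Heap} {rest : List Obj} {frames : List (Nat × FrameLayout)} {F Fc : Forest} {R : Rd}
    {e s : State} {base top lo : Nat} {Fl : FrameLayout} {mem : Mem} (henv : Env H rest frames F R e)
    (hreg : SameRegion H Hc)
    (hinv : HeapInv Hc rest ((base, Fl) :: frames) top mem) (hok : GifOK Hc Fc R mem)
    (hs : Mem.SameExcept [⟨lo, top⟩] mem s.mem) (hlo : 0x700000 ≤ lo) (htop : top ≤ (e.reg .rsp).toNat + 8)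
    (hsp : (s.reg .rsp).toNat + 8 ≤ top) (h8 : (s.reg .rsp).toNat % 8 = 0) (hlo' : 0x700000 ≤ (s.reg .rsp).toNat + 8) :
    Env Hc rest ((base, Fl) :: frames) Fc R s := by
  have hcur := henv.ctx.cursor_range henv.heap.inv.shadow
  have hhi := hinv.shadow.stack.hi
  have hoff := hinv.heap.offStack
  have hroom := hinv.heap.room
  have hun : ShadowUntouched mem s.mem := by
    apply hs.eqOn
    intro w hw
    have e := List.mem_singleton.mp hw
    rw [e]
    simp only
    omega
  have hinv' : HeapInv Hc rest ((base, Fl) :: frames) ((s.reg .rsp).toNat + 8) s.mem := by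
    refine (hinv.sameExcept hun hs ?_).lower hsp (by omega) hlo'
    intro w hw
    have e := List.mem_singleton.mp hw
    rw [e]
    left
    simp only
    omega
  have hb : Hc.base = 0x800000 := by
    rw [hreg.1]
    exact henv.heap.base
  have hl : Hc.limit = 0xC00000 := by
    rw [hreg.2]
    exact henv.heap.limit
  refine ⟨⟨hinv', hb, hl, henv.heap.text, henv.heap.offText⟩, henv.ctx.push base Fl, ?_⟩
  apply hok.sameExcept hinv.heap ⟨hcur.1, hcur.2.1⟩ hs
  intro w hw
  have e := List.mem_singleton.mp hw
  rw [e]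
  apply Loose.stack hinv.heap
  · simp only
    omega
  · simp only
    omega
  · simp only
    omega

/-- **At 10A869H (`ret17`), `DGifGetExtension(gif, &ExtFunction, &ExtData)` has returned** (dgif_lib.c:1277): `At` for the same heap
and forest (its post is `Back`), every counted image complete, the round's measure still below `m`; `eax` is 0 or 1, and GIF_OK
says what `ExtData` (the frame's object at `RA − 88` = `rsp + 40H`) holds: NULL, or `&pv.Buf` with `Buf[0]` between 1 and 255. -/
structure sl10_AtRet17 (H : Heap) (rest : List Obj) (frames : List (Nat × FrameLayout)) (F : Forest) (R : Rd) (Hc : Heap)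
    (Fc : Forest) (m : Nat) (u₀ e : State) (ret : Word) (v : State) : Prop where
  /-- the body's assertion at `ret17` -/
  at_ : DGifSlurp.At Gif.L.DGifSlurp.ret17 H rest frames F R Hc Fc u₀ e ret v
  /-- every counted image complete -/
  complete : Fc.Complete
  /-- the round consumed input (the reader did not go back in the callee) -/
  lt : rem R v.mem < m
  /-- the result in `eax`: GIF_OK or GIF_ERROR -/
  bool : IsBool v
  /-- GIF_OK: `ExtData` is NULL or `&pv.Buf`, with the length byte `Buf[0]` in 1 … 255 -/
  ext : (v.reg .rax).toNat = 1 →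
    rd v.mem ((e.reg .rsp).toNat - 88) 8 = 0 ∨
    (rd v.mem ((e.reg .rsp).toNat - 88) 8 = Fc.pv + 88 ∧ 1 ≤ rd v.mem (Fc.pv + 88) 1 ∧ rd v.mem (Fc.pv + 88) 1 ≤ 255)

/-- **10A853H … the call of DGifGetExtension … 10A869H (`ret17`)** (dgif_lib.c:1277 `DGifGetExtension(GifFile, &ExtFunction,
&ExtData)`): `rsi = rsp + 30H = RA − 104` (`&ExtFunction`), `rdx = rsp + 40H = RA − 88` (`&ExtData`): two objects of the own frame
(`OutPtr.own`), `rdi = rbp = gif`. -/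
theorem sl10_seg_call (Lay : Layout) (hLay : Lay.hi = 0x1000000) (μ : Microarch) (hμ : UserX.MicroOK μ) (u₀ : State)
    (hcode : HasCodeNat Lay u₀ Gif.L.DGifSlurp.entry Gif.Code.code_DGifSlurp.nat Gif.L.DGifSlurp.size)
    (H : Heap) (rest : List Obj) (frames : List (Nat × FrameLayout)) (F : Forest) (R : Rd) (Hc : Heap) (Fc : Forest) (m : Nat)
    (e : State) (ret : Word)
    (h_DGifGetExtension : Calls Lay μ ProgX.Base.WayInv (ProgX.Base.conv u₀) Gif.L.DGifGetExtension.entry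
      (Gif.Spec.DGifGetExtension.spec Hc rest (DGifSlurp.framesIn frames e) Fc R))
    (v : State) (hat : DGifSlurp.Rec Gif.L.DGifSlurp.at_10a853 H rest frames F R Hc Fc m u₀ e ret v) :
    ReachVia Lay μ ProgX.Base.WayInv v (sl10_AtRet17 H rest frames F R Hc Fc m u₀ e ret) := by
  obtain ⟨⟨hcore, hreg, hgif, hpv, hinv, hok⟩, hcomplete, hlt⟩ := hat
  -- THE PRELUDE: the entry state's facts, then what the walker reads of the present state `v`
  have he := hcore.entry
  v_entry he
  obtain ⟨henv, hrdi, hcomp0⟩ := hcore.pre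
  have w_rip := hcore.rip
  have c_rsp : v.reg .rsp = e.reg .rsp - 152 := hcore.rsp
  have c_rbp : v.reg .rbp = e.reg .rdi := hcore.rbp
  have w_kept : RegsKept [.rsp] v v := RegsKept.refl _ _
  have w_eq : Mem.EqOn ProgX.Base.L.textLo ProgX.Base.L.textHi u₀.mem v.mem := ProgX.Base.conv_code_eqOn hcore.code
  have hdf := (show abiInv _ from hcore.abi).1
  have hmx := (show abiInv _ from hcore.abi).2
  have hsse := ProgX.Base.sseOK_of_abiInv hcore.abi
  have k_r15 : v.mem.readLE (e.reg .rsp - 8) 8 = (e.reg .r15).toNat := hcore.slot_r15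
  have k_r14 : v.mem.readLE (e.reg .rsp - 16) 8 = (e.reg .r14).toNat := hcore.slot_r14
  have k_r13 : v.mem.readLE (e.reg .rsp - 24) 8 = (e.reg .r13).toNat := hcore.slot_r13
  have k_r12 : v.mem.readLE (e.reg .rsp - 32) 8 = (e.reg .r12).toNat := hcore.slot_r12
  have k_rbp : v.mem.readLE (e.reg .rsp - 40) 8 = (e.reg .rbp).toNat := hcore.slot_rbp
  have k_rbx : v.mem.readLE (e.reg .rsp - 48) 8 = (e.reg .rbx).toNat := hcore.slot_rbx
  have k_ra : UInt64.ofNat (v.mem.readLE (e.reg .rsp) 8) = ret := hcore.slot_ra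
  have hsame : Mem.SameExcept
    [⟨(e.reg .rsp).toNat - 848, (e.reg .rsp).toNat⟩,
     shadowSpan ((e.reg .rsp).toNat - 152) ((e.reg .rsp).toNat - 56),
     ⟨0x800000, 0x1000020⟩,
     ⟨R.cur, R.cur + 8⟩] e.mem v.mem := hcore.same
  -- where the cursor, gif and pv are, as numbers (`v_side`, `u_same`, `u_omega` place every store with them)
  have hcur := henv.ctx.cursor_range henv.heap.inv.shadow
  have hbase : Hc.base = 0x800000 := by
    rw [hreg.1]
    exact henv.heap.base
  have hgin := hok.owns.inside hinv.heap (o := (Fc.gif, 120)) List.mem_cons_self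
  have hpin := hok.owns.inside hinv.heap (o := (Fc.pv, 24936)) (List.mem_cons_of_mem _ List.mem_cons_self)
  simp only at hgin hpin
  rw [hbase] at hgin hpin
  have hg1 := hgin.1
  have hg2 := hgin.2.2.2.2
  have hp1 := hpin.1
  have hp2 := hpin.2.2.2.2
  clear hgin hpin
  -- THE WALK, to the call's return address
  u_walk hcode [hμ.vendor] until [Gif.L.DGifSlurp.ret17] span [ProgX.Base.L.textLo, ProgX.Base.L.textHi] side (v_side)
  case call_inv =>
    v_inv
  case pre_10a864 =>
    -- DGifGetExtension's PRECONDITION. The environment for the frame list with the own frame in front: only the return address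
    -- was pushed since `v`
    have hs : Mem.SameExcept [⟨(e.reg .rsp).toNat - 848, (e.reg .rsp).toNat - 152⟩] v.mem s_10a864.mem := by
      rw [w_mem]
      u_same
    have henv' : Env Hc rest (DGifSlurp.framesIn frames e) Fc R s_10a864 := by
      refine sl10_env_at_call henv hreg hinv hok hs (by omega) (by omega) ?_ ?_ ?_
      · rw [w_rsp]
        u_omega
      · rw [w_rsp]
        u_omega
      · rw [w_rsp]
        u_omega
    -- the two out-pointers are the frame's objects `ExtFunction` (base + 48, 4 bytes) and `ExtData` (base + 64, 8 bytes)
    have hsz : Gif.Frames.DGifSlurp.size = 96 := rfl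
    have hb : (e.reg .rsp).toNat - 152 + Gif.Frames.DGifSlurp.size ≤ (e.reg .rsp).toNat + 8 := by
      rw [hsz]
      omega
    have hoF : (⟨(e.reg .rsp).toNat - 152 + 48, 4, .stack⟩ : Obj) ∈
        Gif.Frames.DGifSlurp.objsAt ((e.reg .rsp).toNat - 152) := List.mem_cons_of_mem _ List.mem_cons_self
    have hoD : (⟨(e.reg .rsp).toNat - 152 + 64, 8, .stack⟩ : Obj) ∈
        Gif.Frames.DGifSlurp.objsAt ((e.reg .rsp).toNat - 152) :=
      List.mem_cons_of_mem _ (List.mem_cons_of_mem _ List.mem_cons_self)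
    have e_rsi : (s_10a864.reg .rsi).toNat = (e.reg .rsp).toNat - 152 + 48 := by
      rw [w_rsi]
      u_omega
    have e_rdx : (s_10a864.reg .rdx).toNat = (e.reg .rsp).toNat - 152 + 64 := by
      rw [w_rdx]
      u_omega
    refine ⟨henv', ?_, ?_, ?_, ?_⟩
    · rw [w_rdi, hgif]
      exact hrdi
    · rw [e_rsi]
      exact OutPtr.own henv.heap henv.ctx hinv hb hoF
    · rw [e_rdx]
      exact OutPtr.own henv.heap henv.ctx hinv hb hoD
    · left
      rw [e_rsi, e_rdx]
      omega
  -- 0x10a869 (ret17): DGifGetExtension HAS RETURNED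
  obtain ⟨hback, hbool, hext⟩ := w_post
  -- the reader at the callee's entry is the cut's: only the return address was pushed
  have hs0 : Mem.SameExcept [⟨(e.reg .rsp).toNat - 848, (e.reg .rsp).toNat - 152⟩] v.mem s_10a864.mem := by
    rw [w_mem_10a864]
    u_same
  have hrem0 : rem R s_10a864.mem = rem R v.mem := by
    apply rem_sameExcept hs0 (by omega)
    intro w hw
    have e := List.mem_singleton.mp hw
    rw [e]
    simp only
    omega
  have e_top : (s_10a864.reg .rsp).toNat + 8 = (e.reg .rsp).toNat - 152 := by
    rw [w_rsp_10a864]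
    u_omega
  have e_rdx : (s_10a864.reg .rdx).toNat = (e.reg .rsp).toNat - 88 := by
    rw [w_rdx_10a864]
    u_omega
  -- the callee's footprint in terms of `v`
  v_after_call w_rsp_10a864 w_mem_10a864
  simp only [w_rsi_10a864, w_rdx_10a864] at w_same
  have hp_r15 : s_10a864.mem.readLE (e.reg .rsp - 8) 8 = (e.reg .r15).toNat := by
    rw [w_mem_10a864]
    u_frame k_r15
  rw [w_mem_10a864] at hp_r15
  have hs_r15 : s_10a864r.mem.readLE (e.reg .rsp - 8) 8 = (e.reg .r15).toNat := by u_frame hp_r15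
  have hp_r14 : s_10a864.mem.readLE (e.reg .rsp - 16) 8 = (e.reg .r14).toNat := by
    rw [w_mem_10a864]
    u_frame k_r14
  rw [w_mem_10a864] at hp_r14
  have hs_r14 : s_10a864r.mem.readLE (e.reg .rsp - 16) 8 = (e.reg .r14).toNat := by u_frame hp_r14
  have hp_r13 : s_10a864.mem.readLE (e.reg .rsp - 24) 8 = (e.reg .r13).toNat := by
    rw [w_mem_10a864]
    u_frame k_r13
  rw [w_mem_10a864] at hp_r13
  have hs_r13 : s_10a864r.mem.readLE (e.reg .rsp - 24) 8 = (e.reg .r13).toNat := by u_frame hp_r13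
  have hp_r12 : s_10a864.mem.readLE (e.reg .rsp - 32) 8 = (e.reg .r12).toNat := by
    rw [w_mem_10a864]
    u_frame k_r12
  rw [w_mem_10a864] at hp_r12
  have hs_r12 : s_10a864r.mem.readLE (e.reg .rsp - 32) 8 = (e.reg .r12).toNat := by u_frame hp_r12
  have hp_rbp : s_10a864.mem.readLE (e.reg .rsp - 40) 8 = (e.reg .rbp).toNat := by
    rw [w_mem_10a864]
    u_frame k_rbp
  rw [w_mem_10a864] at hp_rbp
  have hs_rbp : s_10a864r.mem.readLE (e.reg .rsp - 40) 8 = (e.reg .rbp).toNat := by u_frame hp_rbp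
  have hp_rbx : s_10a864.mem.readLE (e.reg .rsp - 48) 8 = (e.reg .rbx).toNat := by
    rw [w_mem_10a864]
    u_frame k_rbx
  rw [w_mem_10a864] at hp_rbx
  have hs_rbx : s_10a864r.mem.readLE (e.reg .rsp - 48) 8 = (e.reg .rbx).toNat := by u_frame hp_rbx
  have hp_ra : UInt64.ofNat (s_10a864.mem.readLE (e.reg .rsp) 8) = ret := by
    rw [w_mem_10a864]
    u_frame k_ra
  rw [w_mem_10a864] at hp_ra
  have hs_ra : UInt64.ofNat (s_10a864r.mem.readLE (e.reg .rsp) 8) = ret := by u_frame hp_ra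
  -- the footprint since the entry: DGifGetExtension's windows lie inside the function's
  have hsame1 : Mem.SameExcept
    [⟨(e.reg .rsp).toNat - 848, (e.reg .rsp).toNat⟩,
     shadowSpan ((e.reg .rsp).toNat - 152) ((e.reg .rsp).toNat - 56),
     ⟨0x800000, 0x1000020⟩,
     ⟨R.cur, R.cur + 8⟩] e.mem s_10a864r.mem := by u_same
  -- the heap's invariant comes back with the clean stack at the callee's `rsp + 8` = the body's `rsp`
  have hinv1 : HeapInv Hc rest (DGifSlurp.framesIn frames e) ((e.reg .rsp).toNat - 152) s_10a864r.mem := by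
    rw [← e_top]
    exact hback.inv
  have hrem1 : rem R s_10a864r.mem ≤ rem R v.mem := by
    rw [← hrem0]
    exact hback.rem
  -- THE EXIT ASSERTION
  have hcore1 : DGifSlurp.Core Gif.L.DGifSlurp.ret17 H rest frames F R u₀ e ret s_10a864r := {
    entry := hcore.entry
    pre := hcore.pre
    rip := w_rip
    rsp := w_rsp
    rbp := (w_kept.get .rbp rfl).trans c_rbp
    r14 := (w_kept.get .r14 rfl).trans hcore.r14
    slot_r15 := hs_r15
    slot_r14 := hs_r14
    slot_r13 := hs_r13
    slot_r12 := hs_r12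
    slot_rbp := hs_rbp
    slot_rbx := hs_rbx
    slot_ra := hs_ra
    rem := Nat.le_trans hrem1 hcore.rem
    same := hsame1
    code := w_code
    abi := w_inv
  }
  refine ReachVia.done ?_
  exact {
    at_ := ⟨hcore1, hreg, hgif, hpv, hinv1, hback.ok⟩
    complete := hcomplete
    lt := Nat.lt_of_le_of_lt hrem1 hlt
    bool := hbool
    ext := by
      intro h1
      obtain ⟨_, hcase⟩ := hext h1
      rw [e_rdx] at hcase
      rcases hcase with ⟨hz, _⟩ | ⟨hd, hb1, hb2, _⟩
      · left
        exact hz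
      · right
        exact ⟨hd, hb1, hb2⟩
  }

/-- **`At` moves to another cut over instructions that store nothing**: the state `s` has the memory of `v`, the body's stack
pointer, `rbp` and `r14` of `v`; `rip` is the new cut. (The four exits of this segment behind a `mov ebx, eax ; test ; je` or a
load are of this kind.) -/
theorem sl10_at_move {cut cut' : Word} {H : Heap} {rest : List Obj} {frames : List (Nat × FrameLayout)} {F : Forest} {R : Rd}
    {Hc : Heap} {Fc : Forest} {u₀ e : State} {ret : Word} {v s : State}
    (hat : DGifSlurp.At cut H rest frames F R Hc Fc u₀ e ret v)
    (hrip : s.rip = cut') (hrsp : s.reg .rsp = e.reg .rsp - 152) (hrbp : s.reg .rbp = v.reg .rbp)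
    (hr14 : s.reg .r14 = v.reg .r14) (hmem : s.mem = v.mem) (hcode : (conv u₀).code.In s.mem) (habi : (conv u₀).inv s) :
    DGifSlurp.At cut' H rest frames F R Hc Fc u₀ e ret s := by
  obtain ⟨hcore, hreg, hgif, hpv, hinv, hok⟩ := hat
  have hcore1 : DGifSlurp.Core cut' H rest frames F R u₀ e ret s := {
    entry := hcore.entry
    pre := hcore.pre
    rip := hrip
    rsp := hrsp
    rbp := hrbp.trans hcore.rbp
    r14 := hr14.trans hcore.r14
    slot_r15 := by
      rw [hmem]
      exact hcore.slot_r15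
    slot_r14 := by
      rw [hmem]
      exact hcore.slot_r14
    slot_r13 := by
      rw [hmem]
      exact hcore.slot_r13
    slot_r12 := by
      rw [hmem]
      exact hcore.slot_r12
    slot_rbp := by
      rw [hmem]
      exact hcore.slot_rbp
    slot_rbx := by
      rw [hmem]
      exact hcore.slot_rbx
    slot_ra := by
      rw [hmem]
      exact hcore.slot_ra
    rem := by
      rw [hmem]
      exact hcore.rem
    same := by
      rw [hmem]
      exact hcore.same
    code := hcode
    abi := habi
  }
  refine ⟨hcore1, hreg, hgif, hpv, ?_, ?_⟩
  · rw [hmem]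
    exact hinv
  · rw [hmem]
    exact hok

/-- **10A869H (`ret17`) … 10A8EDH, GIF_ERROR** (dgif_lib.c:1277-1279): `mov ebx, eax ; test eax, eax ; je`: taken. No store: the
epilogue's assertion `Done` for the same heap and forest. -/
theorem sl10_seg_err (Lay : Layout) (hLay : Lay.hi = 0x1000000) (μ : Microarch) (hμ : UserX.MicroOK μ) (u₀ : State)
    (hcode : HasCodeNat Lay u₀ Gif.L.DGifSlurp.entry Gif.Code.code_DGifSlurp.nat Gif.L.DGifSlurp.size)
    (H : Heap) (rest : List Obj) (frames : List (Nat × FrameLayout)) (F : Forest) (R : Rd) (Hc : Heap) (Fc : Forest) (m : Nat)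
    (e : State) (ret : Word)
    (v : State) (hat : sl10_AtRet17 H rest frames F R Hc Fc m u₀ e ret v) (h0 : (v.reg .rax).toNat = 0) :
    ReachVia Lay μ ProgX.Base.WayInv v (DGifSlurp.Exit H rest frames F R u₀ e ret) := by
  obtain ⟨hat0, hcomplete, hlt, hbool, hext⟩ := hat
  have hat1 := hat0
  obtain ⟨hcore, hreg, hgif, hpv, hinv, hok⟩ := hat0
  -- `eax` as a variable `z`, and its value in the form of the walker's branch fact (`test eax, eax ; je`)
  obtain ⟨z, c_rax⟩ : ∃ z, v.reg .rax = z := ⟨_, rfl⟩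
  rw [c_rax] at h0
  have h0' : (Word.part Width.w32 z).toNat = 0 := by
    rw [toNat_part32, h0]
  clear h0 hext hbool
  -- THE PRELUDE: the entry state's facts, then what the walker reads of the present state `v`
  have he := hcore.entry
  v_entry he
  obtain ⟨henv, hrdi, hcomp0⟩ := hcore.pre
  have w_rip := hcore.rip
  have c_rsp : v.reg .rsp = e.reg .rsp - 152 := hcore.rsp
  have c_rbp : v.reg .rbp = e.reg .rdi := hcore.rbp
  have w_kept : RegsKept [.rsp] v v := RegsKept.refl _ _
  have w_eq : Mem.EqOn ProgX.Base.L.textLo ProgX.Base.L.textHi u₀.mem v.mem := ProgX.Base.conv_code_eqOn hcore.code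
  have hdf := (show abiInv _ from hcore.abi).1
  have hmx := (show abiInv _ from hcore.abi).2
  have hsse := ProgX.Base.sseOK_of_abiInv hcore.abi
  have k_r15 : v.mem.readLE (e.reg .rsp - 8) 8 = (e.reg .r15).toNat := hcore.slot_r15
  have k_r14 : v.mem.readLE (e.reg .rsp - 16) 8 = (e.reg .r14).toNat := hcore.slot_r14
  have k_r13 : v.mem.readLE (e.reg .rsp - 24) 8 = (e.reg .r13).toNat := hcore.slot_r13
  have k_r12 : v.mem.readLE (e.reg .rsp - 32) 8 = (e.reg .r12).toNat := hcore.slot_r12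
  have k_rbp : v.mem.readLE (e.reg .rsp - 40) 8 = (e.reg .rbp).toNat := hcore.slot_rbp
  have k_rbx : v.mem.readLE (e.reg .rsp - 48) 8 = (e.reg .rbx).toNat := hcore.slot_rbx
  have k_ra : UInt64.ofNat (v.mem.readLE (e.reg .rsp) 8) = ret := hcore.slot_ra
  have hsame : Mem.SameExcept
    [⟨(e.reg .rsp).toNat - 848, (e.reg .rsp).toNat⟩,
     shadowSpan ((e.reg .rsp).toNat - 152) ((e.reg .rsp).toNat - 56),
     ⟨0x800000, 0x1000020⟩,
     ⟨R.cur, R.cur + 8⟩] e.mem v.mem := hcore.same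
  -- where the cursor, gif and pv are, as numbers (`v_side`, `u_same`, `u_omega` place every store with them)
  have hcur := henv.ctx.cursor_range henv.heap.inv.shadow
  have hbase : Hc.base = 0x800000 := by
    rw [hreg.1]
    exact henv.heap.base
  have hgin := hok.owns.inside hinv.heap (o := (Fc.gif, 120)) List.mem_cons_self
  have hpin := hok.owns.inside hinv.heap (o := (Fc.pv, 24936)) (List.mem_cons_of_mem _ List.mem_cons_self)
  simp only at hgin hpin
  rw [hbase] at hgin hpin
  have hg1 := hgin.1
  have hg2 := hgin.2.2.2.2
  have hp1 := hpin.1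
  have hp2 := hpin.2.2.2.2
  clear hgin hpin
  -- THE WALK, to the next cut (the dead arms are pruned by the facts above)
  u_walk hcode [hμ.vendor] until [Gif.L.DGifSlurp.at_10a8ed, Gif.L.DGifSlurp.at_10a8a2]
    span [ProgX.Base.L.textLo, ProgX.Base.L.textHi] side (v_side)
  -- 0x10a8ed FROM 0x10a86d: GIF_ERROR; nothing was stored since `ret17`
  have habi : (conv u₀).inv s_10a86d := by
    refine ProgX.Base.abiInv_of ?_ ?_
    · rw [w_flags]
      simp only [X86.User.df_setStatus]
      exact hdf
    · rw [w_mxcsr]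
      exact hmx
  refine ReachVia.done ?_
  exact ⟨Hc, Fc, sl10_at_move hat1 w_rip w_rsp (w_kept.get .rbp rfl) (w_kept.get .r14 rfl) w_mem
    (ProgX.Base.conv_code_in w_eq) habi, hcomplete⟩

/-- **10A869H (`ret17`) … 10A8A2H, GIF_OK and `ExtData = NULL`** (dgif_lib.c:1282, W-1): `rbx = ExtData` (a load from the own
frame), `test rbx, rbx ; je`: taken. No store: the sub-block head's assertion for the same heap and forest, with the measure
`k = rem R v.mem < m`. -/
theorem sl10_seg_null (Lay : Layout) (hLay : Lay.hi = 0x1000000) (μ : Microarch) (hμ : UserX.MicroOK μ) (u₀ : State)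
    (hcode : HasCodeNat Lay u₀ Gif.L.DGifSlurp.entry Gif.Code.code_DGifSlurp.nat Gif.L.DGifSlurp.size)
    (H : Heap) (rest : List Obj) (frames : List (Nat × FrameLayout)) (F : Forest) (R : Rd) (Hc : Heap) (Fc : Forest) (m : Nat)
    (e : State) (ret : Word)
    (v : State) (hat : sl10_AtRet17 H rest frames F R Hc Fc m u₀ e ret v) (h1 : (v.reg .rax).toNat = 1)
    (hnull : rd v.mem ((e.reg .rsp).toNat - 88) 8 = 0) :
    ReachVia Lay μ ProgX.Base.WayInv v (fun w =>
      ∃ (H' : Heap) (F' : Forest) (k : Nat), DGifSlurp.ExtHead H rest frames F R H' F' m k u₀ e ret w) := by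
  obtain ⟨hat0, hcomplete, hlt, hbool, hext⟩ := hat
  have hat1 := hat0
  obtain ⟨hcore, hreg, hgif, hpv, hinv, hok⟩ := hat0
  -- `eax` as a variable `z`, and its value in the form of the walker's branch fact (`test eax, eax ; je`)
  obtain ⟨z, c_rax⟩ : ∃ z, v.reg .rax = z := ⟨_, rfl⟩
  rw [c_rax] at h1
  have h1' : (Word.part Width.w32 z).toNat = 1 := by
    rw [toNat_part32, h1]
  clear h1 hext hbool
  -- THE PRELUDE: the entry state's facts, then what the walker reads of the present state `v`
  have he := hcore.entry
  v_entry he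
  obtain ⟨henv, hrdi, hcomp0⟩ := hcore.pre
  have w_rip := hcore.rip
  have c_rsp : v.reg .rsp = e.reg .rsp - 152 := hcore.rsp
  have c_rbp : v.reg .rbp = e.reg .rdi := hcore.rbp
  have w_kept : RegsKept [.rsp] v v := RegsKept.refl _ _
  have w_eq : Mem.EqOn ProgX.Base.L.textLo ProgX.Base.L.textHi u₀.mem v.mem := ProgX.Base.conv_code_eqOn hcore.code
  have hdf := (show abiInv _ from hcore.abi).1
  have hmx := (show abiInv _ from hcore.abi).2
  have hsse := ProgX.Base.sseOK_of_abiInv hcore.abi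
  have k_r15 : v.mem.readLE (e.reg .rsp - 8) 8 = (e.reg .r15).toNat := hcore.slot_r15
  have k_r14 : v.mem.readLE (e.reg .rsp - 16) 8 = (e.reg .r14).toNat := hcore.slot_r14
  have k_r13 : v.mem.readLE (e.reg .rsp - 24) 8 = (e.reg .r13).toNat := hcore.slot_r13
  have k_r12 : v.mem.readLE (e.reg .rsp - 32) 8 = (e.reg .r12).toNat := hcore.slot_r12
  have k_rbp : v.mem.readLE (e.reg .rsp - 40) 8 = (e.reg .rbp).toNat := hcore.slot_rbp
  have k_rbx : v.mem.readLE (e.reg .rsp - 48) 8 = (e.reg .rbx).toNat := hcore.slot_rbx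
  have k_ra : UInt64.ofNat (v.mem.readLE (e.reg .rsp) 8) = ret := hcore.slot_ra
  have hsame : Mem.SameExcept
    [⟨(e.reg .rsp).toNat - 848, (e.reg .rsp).toNat⟩,
     shadowSpan ((e.reg .rsp).toNat - 152) ((e.reg .rsp).toNat - 56),
     ⟨0x800000, 0x1000020⟩,
     ⟨R.cur, R.cur + 8⟩] e.mem v.mem := hcore.same
  -- where the cursor, gif and pv are, as numbers (`v_side`, `u_same`, `u_omega` place every store with them)
  have hcur := henv.ctx.cursor_range henv.heap.inv.shadow
  have hbase : Hc.base = 0x800000 := by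
    rw [hreg.1]
    exact henv.heap.base
  have hgin := hok.owns.inside hinv.heap (o := (Fc.gif, 120)) List.mem_cons_self
  have hpin := hok.owns.inside hinv.heap (o := (Fc.pv, 24936)) (List.mem_cons_of_mem _ List.mem_cons_self)
  simp only at hgin hpin
  rw [hbase] at hgin hpin
  have hg1 := hgin.1
  have hg2 := hgin.2.2.2.2
  have hp1 := hpin.1
  have hp2 := hpin.2.2.2.2
  clear hgin hpin
  -- the load of `ExtData` (`mov rbx, [rsp + 40H]`), as a fact in the walker's form
  have l_ext : v.mem.readLE (e.reg .rsp - 88) 8 = 0 := by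
    rw [rd_eq_readLE v.mem (e.reg .rsp - 88) ((e.reg .rsp).toNat - 88) 8 (by u_omega)]
    exact hnull
  -- THE WALK, to the next cut (the dead arms are pruned by the facts above)
  u_walk hcode [hμ.vendor] until [Gif.L.DGifSlurp.at_10a8ed, Gif.L.DGifSlurp.at_10a8a2]
    span [ProgX.Base.L.textLo, ProgX.Base.L.textHi] side (v_side)
  -- 0x10a8a2 FROM 0x10a877: GIF_OK and `ExtData = NULL` (l.1282); nothing was stored since `ret17`
  have habi : (conv u₀).inv s_10a877 := by
    refine ProgX.Base.abiInv_of ?_ ?_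
    · rw [w_flags]
      simp only [X86.User.df_setStatus]
      exact hdf
    · rw [w_mxcsr]
      exact hmx
  refine ReachVia.done ?_
  refine ⟨Hc, Fc, rem R s_10a877.mem, sl10_at_move hat1 w_rip w_rsp (w_kept.get .rbp rfl) (w_kept.get .r14 rfl) w_mem
    (ProgX.Base.conv_code_in w_eq) habi, hcomplete, rfl, ?_⟩
  rw [w_mem]
  exact hlt

/-- **10A869H (`ret17`) … the call of GifAddExtensionBlock … 10A89CH (`ret19`), GIF_OK and `ExtData = &pv.Buf`**
(dgif_lib.c:1283-1286): `rbx = pv + 88`, `r12 = pv + 89`, the checked byte load of `Buf[0]` (`bufLive`: inside the array `Buf[256]`),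
`ecx = Buf[0] = len`, `edx = ExtFunction`, `rsi = gif + 88`, `rdi = gif + 80`, `r8 = pv + 89`; the call with the ghost `len`. Its post
gives A heap and A forest that differs in `pend` only: `Rec` at `ret19` for them (complete still, `rem` unchanged). -/
theorem sl10_seg_add (Lay : Layout) (hLay : Lay.hi = 0x1000000) (μ : Microarch) (hμ : UserX.MicroOK μ) (u₀ : State)
    (hcode : HasCodeNat Lay u₀ Gif.L.DGifSlurp.entry Gif.Code.code_DGifSlurp.nat Gif.L.DGifSlurp.size)
    (H : Heap) (rest : List Obj) (frames : List (Nat × FrameLayout)) (F : Forest) (R : Rd) (Hc : Heap) (Fc : Forest) (m : Nat)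
    (e : State) (ret : Word) (len : Nat)
    (h_asan_load1_noabort : Asan.SmallCheck Lay μ ProgX.Base.WayInv (ProgX.Base.CodeOK u₀) [.rax, .rdx] 1
      ProgX.Base.L.__asan_load1_noabort.entry)
    (h_GifAddExtensionBlock : Calls Lay μ ProgX.Base.WayInv (ProgX.Base.conv u₀) Gif.L.GifAddExtensionBlock.entry
      (Gif.Spec.GifAddExtensionBlock.spec Hc rest (DGifSlurp.framesIn frames e) Fc R len))
    (v : State) (hat : sl10_AtRet17 H rest frames F R Hc Fc m u₀ e ret v) (h1 : (v.reg .rax).toNat = 1)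
    (hdata : rd v.mem ((e.reg .rsp).toNat - 88) 8 = Fc.pv + 88)
    (hlen : rd v.mem (Fc.pv + 88) 1 = len) (hlen1 : 1 ≤ len) (hlen2 : len ≤ 255) :
    ReachVia Lay μ ProgX.Base.WayInv v (fun w =>
      ∃ (H' : Heap) (F' : Forest), DGifSlurp.Rec Gif.L.DGifSlurp.ret19 H rest frames F R H' F' m u₀ e ret w) := by
  obtain ⟨hat0, hcomplete, hlt, hbool, hext⟩ := hat
  have hat1 := hat0
  obtain ⟨hcore, hreg, hgif, hpv, hinv, hok⟩ := hat0
  -- `eax` as a variable `z`, and its value in the form of the walker's branch fact (`test eax, eax ; je`)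
  obtain ⟨z, c_rax⟩ : ∃ z, v.reg .rax = z := ⟨_, rfl⟩
  rw [c_rax] at h1
  have h1' : (Word.part Width.w32 z).toNat = 1 := by
    rw [toNat_part32, h1]
  clear h1 hext hbool
  -- THE PRELUDE: the entry state's facts, then what the walker reads of the present state `v`
  have he := hcore.entry
  v_entry he
  obtain ⟨henv, hrdi, hcomp0⟩ := hcore.pre
  have w_rip := hcore.rip
  have c_rsp : v.reg .rsp = e.reg .rsp - 152 := hcore.rsp
  have c_rbp : v.reg .rbp = e.reg .rdi := hcore.rbp
  have w_kept : RegsKept [.rsp] v v := RegsKept.refl _ _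
  have w_eq : Mem.EqOn ProgX.Base.L.textLo ProgX.Base.L.textHi u₀.mem v.mem := ProgX.Base.conv_code_eqOn hcore.code
  have hdf := (show abiInv _ from hcore.abi).1
  have hmx := (show abiInv _ from hcore.abi).2
  have hsse := ProgX.Base.sseOK_of_abiInv hcore.abi
  have k_r15 : v.mem.readLE (e.reg .rsp - 8) 8 = (e.reg .r15).toNat := hcore.slot_r15
  have k_r14 : v.mem.readLE (e.reg .rsp - 16) 8 = (e.reg .r14).toNat := hcore.slot_r14
  have k_r13 : v.mem.readLE (e.reg .rsp - 24) 8 = (e.reg .r13).toNat := hcore.slot_r13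
  have k_r12 : v.mem.readLE (e.reg .rsp - 32) 8 = (e.reg .r12).toNat := hcore.slot_r12
  have k_rbp : v.mem.readLE (e.reg .rsp - 40) 8 = (e.reg .rbp).toNat := hcore.slot_rbp
  have k_rbx : v.mem.readLE (e.reg .rsp - 48) 8 = (e.reg .rbx).toNat := hcore.slot_rbx
  have k_ra : UInt64.ofNat (v.mem.readLE (e.reg .rsp) 8) = ret := hcore.slot_ra
  have hsame : Mem.SameExcept
    [⟨(e.reg .rsp).toNat - 848, (e.reg .rsp).toNat⟩,
     shadowSpan ((e.reg .rsp).toNat - 152) ((e.reg .rsp).toNat - 56),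
     ⟨0x800000, 0x1000020⟩,
     ⟨R.cur, R.cur + 8⟩] e.mem v.mem := hcore.same
  -- where the cursor, gif and pv are, as numbers (`v_side`, `u_same`, `u_omega` place every store with them)
  have hcur := henv.ctx.cursor_range henv.heap.inv.shadow
  have hbase : Hc.base = 0x800000 := by
    rw [hreg.1]
    exact henv.heap.base
  have hgin := hok.owns.inside hinv.heap (o := (Fc.gif, 120)) List.mem_cons_self
  have hpin := hok.owns.inside hinv.heap (o := (Fc.pv, 24936)) (List.mem_cons_of_mem _ List.mem_cons_self)
  simp only at hgin hpin
  rw [hbase] at hgin hpin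
  have hg1 := hgin.1
  have hg2 := hgin.2.2.2.2
  have hp1 := hpin.1
  have hp2 := hpin.2.2.2.2
  clear hgin hpin
  -- the loads of `ExtData` (`mov rbx, [rsp + 40H]`) and of `Buf[0]` (`movzx ecx, byte [rbx]`), as facts in the walker's form
  have l_ext : v.mem.readLE (e.reg .rsp - 88) 8 = Fc.pv + 88 := by
    rw [rd_eq_readLE v.mem (e.reg .rsp - 88) ((e.reg .rsp).toNat - 88) 8 (by u_omega)]
    exact hdata
  have l_len : v.mem.readLE (UInt64.ofNat (Fc.pv + 88)) 1 = len := by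
    rw [rd_eq_readLE v.mem (UInt64.ofNat (Fc.pv + 88)) (Fc.pv + 88) 1 (by u_omega)]
    exact hlen
  -- THE WALK, through the check call to the return address of GifAddExtensionBlock (both `je` are pruned by the facts above)
  u_walk hcode [hμ.vendor] until [Gif.L.DGifSlurp.at_10a8ed, Gif.L.DGifSlurp.at_10a8a2, Gif.L.DGifSlurp.ret19]
    span [ProgX.Base.L.textLo, ProgX.Base.L.textHi] side (v_side)
  case check_10a880 =>
    -- dgif_lib.c:1286 the load of `ExtData[0]` = `pv.Buf[0]`: inside the array `Buf[256]` of the private object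
    have hun : ShadowUntouched v.mem s_10a880.mem := by v_untouched
    have hbl := bufLive hok.pv_live rest (DGifSlurp.framesIn frames e) 0 1 (by omega)
    simp only [gfield] at hbl
    exact hbl.accSmall hinv.shadow hun _ 1 (by decide) (by u_omega) (by u_omega)
  case call_inv =>
    v_inv
  case pre_10a897 =>
    -- GifAddExtensionBlock's PRECONDITION. The environment for the frame list with the own frame in front: only a return
    -- address was pushed since `v` (twice into the same slot)
    have hs : Mem.SameExcept [⟨(e.reg .rsp).toNat - 848, (e.reg .rsp).toNat - 152⟩] v.mem s_10a897.mem := by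
      rw [w_mem]
      u_same
    have henv' : Env Hc rest (DGifSlurp.framesIn frames e) Fc R s_10a897 := by
      refine sl10_env_at_call henv hreg hinv hok hs (by omega) (by omega) ?_ ?_ ?_
      · rw [w_rsp]
        u_omega
      · rw [w_rsp]
        u_omega
      · rw [w_rsp]
        u_omega
    have e_r8 : (s_10a897.reg .r8).toNat = Fc.pv + 89 := by
      rw [w_r8]
      u_omega
    refine ⟨henv', ?_, ?_, ?_, hlen1, hlen2, ?_, ?_⟩
    · rw [w_rdi]
      u_omega
    · rw [w_rsi]
      u_omega
    · rw [w_rcx, movzx8_toNat]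
      omega
    · rw [e_r8]
      omega
    · rw [e_r8]
      omega
  -- 0x10a89c (ret19): GifAddExtensionBlock HAS RETURNED, with A heap `H'` and A forest `F'` that differs from `Fc` in `pend` only
  obtain ⟨H', F', hback, hsbp, _, hremeq⟩ := w_post
  -- the reader at the callee's entry is that of `ret17`: only a return address was pushed
  have hs0 : Mem.SameExcept [⟨(e.reg .rsp).toNat - 848, (e.reg .rsp).toNat - 152⟩] v.mem s_10a897.mem := by
    rw [w_mem_10a897]
    u_same
  have hrem0 : rem R s_10a897.mem = rem R v.mem := by
    apply rem_sameExcept hs0 (by omega)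
    intro w hw
    have e := List.mem_singleton.mp hw
    rw [e]
    simp only
    omega
  have e_top : (s_10a897.reg .rsp).toNat + 8 = (e.reg .rsp).toNat - 152 := by
    rw [w_rsp_10a897]
    u_omega
  -- the callee's footprint in terms of `v`
  v_after_call w_rsp_10a897 w_mem_10a897
  -- THE SLOTS AND THE RETURN ADDRESS, over the pushed return address (first step) and through the callee's footprint (second step)
  have hp_r15 : s_10a897.mem.readLE (e.reg .rsp - 8) 8 = (e.reg .r15).toNat := by
    rw [w_mem_10a897]
    u_frame k_r15
  rw [w_mem_10a897] at hp_r15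
  have hs_r15 : s_10a897r.mem.readLE (e.reg .rsp - 8) 8 = (e.reg .r15).toNat := by u_frame hp_r15
  have hp_r14 : s_10a897.mem.readLE (e.reg .rsp - 16) 8 = (e.reg .r14).toNat := by
    rw [w_mem_10a897]
    u_frame k_r14
  rw [w_mem_10a897] at hp_r14
  have hs_r14 : s_10a897r.mem.readLE (e.reg .rsp - 16) 8 = (e.reg .r14).toNat := by u_frame hp_r14
  have hp_r13 : s_10a897.mem.readLE (e.reg .rsp - 24) 8 = (e.reg .r13).toNat := by
    rw [w_mem_10a897]
    u_frame k_r13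
  rw [w_mem_10a897] at hp_r13
  have hs_r13 : s_10a897r.mem.readLE (e.reg .rsp - 24) 8 = (e.reg .r13).toNat := by u_frame hp_r13
  have hp_r12 : s_10a897.mem.readLE (e.reg .rsp - 32) 8 = (e.reg .r12).toNat := by
    rw [w_mem_10a897]
    u_frame k_r12
  rw [w_mem_10a897] at hp_r12
  have hs_r12 : s_10a897r.mem.readLE (e.reg .rsp - 32) 8 = (e.reg .r12).toNat := by u_frame hp_r12
  have hp_rbp : s_10a897.mem.readLE (e.reg .rsp - 40) 8 = (e.reg .rbp).toNat := by
    rw [w_mem_10a897]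
    u_frame k_rbp
  rw [w_mem_10a897] at hp_rbp
  have hs_rbp : s_10a897r.mem.readLE (e.reg .rsp - 40) 8 = (e.reg .rbp).toNat := by u_frame hp_rbp
  have hp_rbx : s_10a897.mem.readLE (e.reg .rsp - 48) 8 = (e.reg .rbx).toNat := by
    rw [w_mem_10a897]
    u_frame k_rbx
  rw [w_mem_10a897] at hp_rbx
  have hs_rbx : s_10a897r.mem.readLE (e.reg .rsp - 48) 8 = (e.reg .rbx).toNat := by u_frame hp_rbx
  have hp_ra : UInt64.ofNat (s_10a897.mem.readLE (e.reg .rsp) 8) = ret := by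
    rw [w_mem_10a897]
    u_frame k_ra
  rw [w_mem_10a897] at hp_ra
  have hs_ra : UInt64.ofNat (s_10a897r.mem.readLE (e.reg .rsp) 8) = ret := by u_frame hp_ra
  -- the footprint since the entry: the callee's windows (its stack, the heap's region and shadow) lie inside the function's
  have hsame1 : Mem.SameExcept
    [⟨(e.reg .rsp).toNat - 848, (e.reg .rsp).toNat⟩,
     shadowSpan ((e.reg .rsp).toNat - 152) ((e.reg .rsp).toNat - 56),
     ⟨0x800000, 0x1000020⟩,
     ⟨R.cur, R.cur + 8⟩] e.mem s_10a897r.mem := by u_same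
  -- the heap's invariant comes back with the clean stack at the callee's `rsp + 8` = the body's `rsp`
  have hinv1 : HeapInv H' rest (DGifSlurp.framesIn frames e) ((e.reg .rsp).toNat - 152) s_10a897r.mem := by
    rw [← e_top]
    exact hback.inv
  have hrem1 : rem R s_10a897r.mem = rem R v.mem := by
    rw [← hrem0]
    exact hremeq
  -- THE EXIT ASSERTION
  have hcore1 : DGifSlurp.Core Gif.L.DGifSlurp.ret19 H rest frames F R u₀ e ret s_10a897r := {
    entry := hcore.entry
    pre := hcore.pre
    rip := w_rip
    rsp := w_rsp
    rbp := (w_kept.get .rbp rfl).trans c_rbp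
    r14 := (w_kept.get .r14 rfl).trans hcore.r14
    slot_r15 := hs_r15
    slot_r14 := hs_r14
    slot_r13 := hs_r13
    slot_r12 := hs_r12
    slot_rbp := hs_rbp
    slot_rbx := hs_rbx
    slot_ra := hs_ra
    rem := by
      rw [hrem1]
      exact hcore.rem
    same := hsame1
    code := w_code
    abi := w_inv
  }
  refine ReachVia.done ?_
  refine ⟨H', F', ⟨hcore1, hreg.trans hback.region, hsbp.1.trans hgif, hsbp.2.1.trans hpv, hinv1, hback.ok⟩, ?_, ?_⟩
  · -- every counted image is complete still: `F'.saved = Fc.saved`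
    intro sv hsv
    rw [hsbp.2.2.2.2] at hsv
    exact hcomplete sv hsv
  · rw [hrem1]
    exact hlt

/-- **10A89CH (`ret19`) … 10A8EDH | 10A8A2H** (dgif_lib.c:1283-1289): `mov ebx, eax ; test eax, eax ; je`: GIF_ERROR to the
epilogue, GIF_OK to the head of the sub-block loop; no store, the heap and forest of GifAddExtensionBlock's post in both. -/
theorem sl10_seg_tail (Lay : Layout) (hLay : Lay.hi = 0x1000000) (μ : Microarch) (hμ : UserX.MicroOK μ) (u₀ : State)
    (hcode : HasCodeNat Lay u₀ Gif.L.DGifSlurp.entry Gif.Code.code_DGifSlurp.nat Gif.L.DGifSlurp.size)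
    (H : Heap) (rest : List Obj) (frames : List (Nat × FrameLayout)) (F : Forest) (R : Rd) (Hc : Heap) (Fc : Forest) (m : Nat)
    (e : State) (ret : Word)
    (v : State) (hat : DGifSlurp.Rec Gif.L.DGifSlurp.ret19 H rest frames F R Hc Fc m u₀ e ret v) :
    ReachVia Lay μ ProgX.Base.WayInv v (fun w =>
      (∃ (H' : Heap) (F' : Forest) (k : Nat), DGifSlurp.ExtHead H rest frames F R H' F' m k u₀ e ret w) ∨
      DGifSlurp.Exit H rest frames F R u₀ e ret w) := by
  obtain ⟨hat0, hcomplete, hlt⟩ := hat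
  have hat1 := hat0
  obtain ⟨hcore, hreg, hgif, hpv, hinv, hok⟩ := hat0
  -- `eax` as a variable `z` (the branch fact of `test eax, eax ; je` speaks of it)
  obtain ⟨z, c_rax⟩ : ∃ z, v.reg .rax = z := ⟨_, rfl⟩
  -- THE PRELUDE: the entry state's facts, then what the walker reads of the present state `v`
  have he := hcore.entry
  v_entry he
  obtain ⟨henv, hrdi, hcomp0⟩ := hcore.pre
  have w_rip := hcore.rip
  have c_rsp : v.reg .rsp = e.reg .rsp - 152 := hcore.rsp
  have c_rbp : v.reg .rbp = e.reg .rdi := hcore.rbp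
  have w_kept : RegsKept [.rsp] v v := RegsKept.refl _ _
  have w_eq : Mem.EqOn ProgX.Base.L.textLo ProgX.Base.L.textHi u₀.mem v.mem := ProgX.Base.conv_code_eqOn hcore.code
  have hdf := (show abiInv _ from hcore.abi).1
  have hmx := (show abiInv _ from hcore.abi).2
  have hsse := ProgX.Base.sseOK_of_abiInv hcore.abi
  have k_r15 : v.mem.readLE (e.reg .rsp - 8) 8 = (e.reg .r15).toNat := hcore.slot_r15
  have k_r14 : v.mem.readLE (e.reg .rsp - 16) 8 = (e.reg .r14).toNat := hcore.slot_r14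
  have k_r13 : v.mem.readLE (e.reg .rsp - 24) 8 = (e.reg .r13).toNat := hcore.slot_r13
  have k_r12 : v.mem.readLE (e.reg .rsp - 32) 8 = (e.reg .r12).toNat := hcore.slot_r12
  have k_rbp : v.mem.readLE (e.reg .rsp - 40) 8 = (e.reg .rbp).toNat := hcore.slot_rbp
  have k_rbx : v.mem.readLE (e.reg .rsp - 48) 8 = (e.reg .rbx).toNat := hcore.slot_rbx
  have k_ra : UInt64.ofNat (v.mem.readLE (e.reg .rsp) 8) = ret := hcore.slot_ra
  have hsame : Mem.SameExcept
    [⟨(e.reg .rsp).toNat - 848, (e.reg .rsp).toNat⟩,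
     shadowSpan ((e.reg .rsp).toNat - 152) ((e.reg .rsp).toNat - 56),
     ⟨0x800000, 0x1000020⟩,
     ⟨R.cur, R.cur + 8⟩] e.mem v.mem := hcore.same
  -- where the cursor, gif and pv are, as numbers (`v_side`, `u_same`, `u_omega` place every store with them)
  have hcur := henv.ctx.cursor_range henv.heap.inv.shadow
  have hbase : Hc.base = 0x800000 := by
    rw [hreg.1]
    exact henv.heap.base
  have hgin := hok.owns.inside hinv.heap (o := (Fc.gif, 120)) List.mem_cons_self
  have hpin := hok.owns.inside hinv.heap (o := (Fc.pv, 24936)) (List.mem_cons_of_mem _ List.mem_cons_self)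
  simp only at hgin hpin
  rw [hbase] at hgin hpin
  have hg1 := hgin.1
  have hg2 := hgin.2.2.2.2
  have hp1 := hpin.1
  have hp2 := hpin.2.2.2.2
  clear hgin hpin
  -- THE WALK, to the next cut (the dead arms are pruned by the facts above)
  u_walk hcode [hμ.vendor] until [Gif.L.DGifSlurp.at_10a8ed, Gif.L.DGifSlurp.at_10a8a2]
    span [ProgX.Base.L.textLo, ProgX.Base.L.textHi] side (v_side)
  · -- 0x10a8ed FROM 0x10a8a0: GIF_ERROR of GifAddExtensionBlock; nothing was stored since `ret19`
    have habi : (conv u₀).inv s_10a8a0 := by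
      refine ProgX.Base.abiInv_of ?_ ?_
      · rw [w_flags]
        simp only [X86.User.df_setStatus]
        exact hdf
      · rw [w_mxcsr]
        exact hmx
    refine ReachVia.done (Or.inr ?_)
    exact ⟨Hc, Fc, sl10_at_move hat1 w_rip w_rsp (w_kept.get .rbp rfl) (w_kept.get .r14 rfl) w_mem
      (ProgX.Base.conv_code_in w_eq) habi, hcomplete⟩
  · -- 0x10a8a2 FROM 0x10a8a0: GIF_OK: to the head of the sub-block loop; nothing was stored since `ret19`
    have habi : (conv u₀).inv s_10a8a0 := by
      refine ProgX.Base.abiInv_of ?_ ?_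
      · rw [w_flags]
        simp only [X86.User.df_setStatus]
        exact hdf
      · rw [w_mxcsr]
        exact hmx
    refine ReachVia.done (Or.inl ?_)
    refine ⟨Hc, Fc, rem R s_10a8a0.mem, sl10_at_move hat1 w_rip w_rsp (w_kept.get .rbp rfl) (w_kept.get .r14 rfl) w_mem
      (ProgX.Base.conv_code_in w_eq) habi, hcomplete, rfl, ?_⟩
    rw [w_mem]
    exact hlt

/-- **10A869H (`ret17`) … 10A8EDH | 10A8A2H | 10A89CH (`ret19`)**: the three arms behind DGifGetExtension, chosen by its result and
by `ExtData` (the result is 0 or 1: `IsBool`; GIF_OK gives `ExtData = NULL` or `ExtData = &pv.Buf` with `Buf[0]` in 1 … 255). -/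
theorem sl10_seg_mid (Lay : Layout) (hLay : Lay.hi = 0x1000000) (μ : Microarch) (hμ : UserX.MicroOK μ) (u₀ : State)
    (hcode : HasCodeNat Lay u₀ Gif.L.DGifSlurp.entry Gif.Code.code_DGifSlurp.nat Gif.L.DGifSlurp.size)
    (H : Heap) (rest : List Obj) (frames : List (Nat × FrameLayout)) (F : Forest) (R : Rd) (Hc : Heap) (Fc : Forest) (m : Nat)
    (e : State) (ret : Word)
    (h_asan_load1_noabort : Asan.SmallCheck Lay μ ProgX.Base.WayInv (ProgX.Base.CodeOK u₀) [.rax, .rdx] 1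
      ProgX.Base.L.__asan_load1_noabort.entry)
    (h_GifAddExtensionBlock : ∀ (len : Nat), Calls Lay μ ProgX.Base.WayInv (ProgX.Base.conv u₀) Gif.L.GifAddExtensionBlock.entry
      (Gif.Spec.GifAddExtensionBlock.spec Hc rest (DGifSlurp.framesIn frames e) Fc R len))
    (v : State) (hat : sl10_AtRet17 H rest frames F R Hc Fc m u₀ e ret v) :
    ReachVia Lay μ ProgX.Base.WayInv v (fun w =>
      (∃ (H' : Heap) (F' : Forest), DGifSlurp.Rec Gif.L.DGifSlurp.ret19 H rest frames F R H' F' m u₀ e ret w) ∨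
      (∃ (H' : Heap) (F' : Forest) (k : Nat), DGifSlurp.ExtHead H rest frames F R H' F' m k u₀ e ret w) ∨
      DGifSlurp.Exit H rest frames F R u₀ e ret w) := by
  rcases hat.bool with h1 | h0
  · rcases hat.ext h1 with hnull | ⟨hdata, hlen1, hlen2⟩
    · -- GIF_OK, `ExtData = NULL`
      refine ReachVia.mono ?_ (fun w hw => Or.inr (Or.inl hw))
      exact sl10_seg_null Lay hLay μ hμ u₀ hcode H rest frames F R Hc Fc m e ret v hat h1 hnull
    · -- GIF_OK, `ExtData = &pv.Buf`
      refine ReachVia.mono ?_ (fun w hw => Or.inl hw)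
      exact sl10_seg_add Lay hLay μ hμ u₀ hcode H rest frames F R Hc Fc m e ret (rd v.mem (Fc.pv + 88) 1)
        h_asan_load1_noabort (h_GifAddExtensionBlock _) v hat h1 hdata rfl hlen1 hlen2
  · -- GIF_ERROR
    refine ReachVia.mono ?_ (fun w hw => Or.inr (Or.inr hw))
    exact sl10_seg_err Lay hLay μ hμ u₀ hcode H rest frames F R Hc Fc m e ret v hat h0

end Gif.Spec.DGifSlurp_10
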